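-- pv_equiv track=rewrite | github.com/Audumla/EDMCVKBConnector | scripts/summarize_changelog.py | _normalize_llm_summary
-- ===== SOURCE A (Python) =====
-- def _normalize_llm_summary(summary: str) -> str:
--     """Normalize LLM output (Claude/Codex) to match the standard template.
--
--     Ensures consistent formatting regardless of which backend generates the summary.
--     - Strips explanatory wrappers and metadata commentary
--     - Deduplicates identical section headers
--     - Adds ### Overview section if missing
--     - Normalizes section headers to ### format
--     - Removes duplicate blank lines
--     """
--     if not summary or not summary.strip():
--         return summary
--
--     lines = summary.split('\n')
--
--     # Find the first ### section header that marks actual content start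
--     start_idx = 0
--     for i, line in enumerate(lines):
--         stripped = line.strip()
--         if stripped.startswith('###'):
--             start_idx = i
--             break
--
--     # Find the end of actual content (before "**Note:**", "Note:", or final ---)
--     end_idx = len(lines)
--     for i in range(len(lines) - 1, -1, -1):
--         stripped = lines[i].strip()
--         if stripped.startswith('**Note:') or stripped.startswith('Note:'):
--             end_idx = i
--             break
--         elif stripped == '---' and i > start_idx + 5:  # Skip early --- (likely wrapper separators)
--             end_idx = i
--             break
--
--     content_lines = lines[start_idx:end_idx]
--
--     # First pass: identify duplicate headers and mark ranges to remove
--     # Keep the SECOND occurrence (which has the real content), remove the FIRST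
--     headers_seen = {}
--     ranges_to_remove = []
--
--     for i, line in enumerate(content_lines):
--         stripped = line.strip()
--         if stripped.startswith('###'):
--             if stripped in headers_seen:
--                 # Found duplicate; mark the FIRST occurrence (from its start to the second one)
--                 prev_idx = headers_seen[stripped]
--                 ranges_to_remove.append((prev_idx, i))
--             headers_seen[stripped] = i
--
--     # Second pass: filter out marked ranges
--     filtered = []
--     for i, line in enumerate(content_lines):
--         skip = False
--         for start, end in ranges_to_remove:
--             if start <= i < end:
--                 skip = True
--                 break
--         if not skip:
--             filtered.append(line)
--
--     # Third pass: clean up formatting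
--     normalized = []
--     has_overview = False
--
--     for i, line in enumerate(filtered):
--         stripped = line.rstrip()
--
--         # Skip pure separator lines (---)
--         if stripped == '---':
--             continue
--
--         # Mark Overview as seen
--         if stripped.startswith('### Overview'):
--             has_overview = True
--
--         # Add the line
--         normalized.append(stripped)
--
--     # Remove trailing empty lines
--     while normalized and not normalized[-1]:
--         normalized.pop()
--
--     # Remove consecutive blank lines (keep max 1)
--     final = []
--     prev_blank = False
--     for line in normalized:
--         is_blank = not line.strip()
--         if is_blank and prev_blank:
--             continue
--         final.append(line)
--         prev_blank = is_blank
--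
--     return '\n'.join(final).strip()
-- ===== SOURCE B (Python) =====
-- def _normalize_llm_summary(summary: str) -> str:
--     """Same normalization with a different shape: the duplicate-header regions are
--     detected ONLINE with a last-occurrence table and a set of still-'open' headers
--     (no ranges list), the separator-drop and rstrip are fused into that single
--     sweep, and one backward pass both drops trailing blanks and collapses blank
--     runs (blank lines are '' after rstrip, so keeping the last of a run equals
--     keeping the first)."""
--     if not summary or not summary.strip():
--         return summary
--
--     lines = summary.split('\n')
--
--     # Content starts at the first ### header (0 if none).
--     start_idx = next((i for i, l in enumerate(lines)
--                       if l.strip().startswith('###')), 0)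
--
--     # Content ends at the LAST Note marker or late '---' separator (len if none).
--     end_idx = len(lines)
--     for i, l in enumerate(lines):
--         s = l.strip()
--         if s.startswith('**Note:') or s.startswith('Note:') or (s == '---' and i > start_idx + 5):
--             end_idx = i
--
--     content = lines[start_idx:end_idx]
--
--     # Last occurrence index of every header string.
--     last = {}
--     for i, l in enumerate(content):
--         s = l.strip()
--         if s.startswith('###'):
--             last[s] = i
--
--     # One sweep: a line lies in a duplicated-header region exactly while some
--     # already-seen header is still 'open' (has a later occurrence); outside such
--     # regions keep the line rstripped, dropping '---' separators.
--     open_headers = set()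
--     kept = []
--     for i, l in enumerate(content):
--         s = l.strip()
--         if s.startswith('###'):
--             if last.get(s, -1) > i:
--                 open_headers.add(s)
--             else:
--                 open_headers.discard(s)
--         if not open_headers:
--             r = l.rstrip()
--             if r != '---':
--                 kept.append(r)
--
--     # Backward pass: drop trailing blanks and collapse blank runs in one go
--     # (a blank is kept only when a kept non-blank line follows it).
--     out = []
--     for l in reversed(kept):
--         if l.strip() or (out and out[-1].strip()):
--             out.append(l)
--     out.reverse()
--
--     return '\n'.join(out).strip()
-- ===== Notes on version B (the rewrite author's own statement) =====
-- stated objective: alternative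
-- what changed: B never materialises A's ranges_to_remove list or re-scans it per line: it builds a last-occurrence table, then detects duplicated-header regions ONLINE with a set of still-open headers while simultaneously rstripping and dropping '---' separators in that same sweep, and replaces A's pop-loop plus prev_blank pass by one backward pass that both drops trailing blanks and collapses blank runs.
import Mathlib
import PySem

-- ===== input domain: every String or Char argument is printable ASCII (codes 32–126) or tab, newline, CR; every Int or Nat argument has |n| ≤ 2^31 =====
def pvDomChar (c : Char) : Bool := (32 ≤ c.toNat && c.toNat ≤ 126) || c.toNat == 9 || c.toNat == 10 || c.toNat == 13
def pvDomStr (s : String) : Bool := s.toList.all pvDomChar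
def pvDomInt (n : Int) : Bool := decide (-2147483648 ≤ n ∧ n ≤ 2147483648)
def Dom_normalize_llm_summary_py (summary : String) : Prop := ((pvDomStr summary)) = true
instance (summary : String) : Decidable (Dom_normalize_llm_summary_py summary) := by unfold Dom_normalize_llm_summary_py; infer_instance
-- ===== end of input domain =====

-- B keeps A's behaviour but works differently: no ranges_to_remove list — duplicated-header
-- regions are detected online with a last-occurrence table and a set of still-open headers,
-- fused with the rstrip/'---' cleaning into one sweep, and one backward pass replaces A's
-- trailing-blank pop loop and prev_blank pass.

-- ===== PORT A =====

-- A: forward loop with break — first index whose stripped line starts with '###' (default 0)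
def pvAStart : List (Int × String) → Int
  | [] => 0
  | (i, line) :: rest =>
      if PySem.Str.startswith (PySem.Str.strip line) "###" then i else pvAStart rest

-- A: loop over the indices from the end with break (ported as a scan of the reversed
-- enumeration): first line that is a Note marker, or a '---' with i > start_idx + 5
def pvAEnd (start_idx dflt : Int) : List (Int × String) → Int
  | [] => dflt
  | (i, line) :: rest =>
      let s := PySem.Str.strip line
      if PySem.Str.startswith s "**Note:" || PySem.Str.startswith s "Note:" then i
      else if s = "---" ∧ start_idx + 5 < i then i
      else pvAEnd start_idx dflt rest

-- A: first dedup pass — headers_seen dict and ranges_to_remove list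
def pvAStepDedup (st : PySem.Dict String Int × List (Int × Int)) (p : Int × String) :
    PySem.Dict String Int × List (Int × Int) :=
  let s := PySem.Str.strip p.2
  if PySem.Str.startswith s "###" then
    match st.1.get? s with
    | some prev => (st.1.insert s p.1, st.2 ++ [(prev, p.1)])
    | none => (st.1.insert s p.1, st.2)
  else st

-- A: inner loop over ranges_to_remove with break (= any)
def pvASkip (ranges : List (Int × Int)) (i : Int) : Bool :=
  ranges.any (fun r => decide (r.1 ≤ i) && decide (i < r.2))

-- A: 'while normalized and not normalized[-1]: normalized.pop()'
def pvPopTrailing (l : List String) : List String :=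
  match h : l.getLast? with
  | some last => if last = "" then pvPopTrailing l.dropLast else l
  | none => l
termination_by l.length
decreasing_by
  have hne : l ≠ [] := by intro e; subst e; simp at h
  have : l.length ≠ 0 := by simpa using fun e => hne (List.eq_nil_of_length_eq_zero e)
  simp [List.length_dropLast]; omega

-- A: last pass — (final, prev_blank) accumulator
def pvAFinalStep (st : List String × Bool) (line : String) : List String × Bool :=
  let is_blank := PySem.Str.strip line == ""
  if is_blank && st.2 then st else (st.1 ++ [line], is_blank)

def normalize_llm_summary_py (summary : String) : String :=
  if summary = "" ∨ PySem.Str.strip summary = "" then summary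
  else
    let lines := (PySem.Str.split? summary "\n").getD []   -- sep "\n" ≠ "": split? is never none
    let start_idx := pvAStart (PySem.List.enumerate lines)
    let end_idx := pvAEnd start_idx (lines.length : Int) (PySem.List.enumerate lines).reverse
    let content := PySem.List.slice lines (some start_idx) (some end_idx)
    let ranges := ((PySem.List.enumerate content).foldl pvAStepDedup (PySem.Dict.empty, [])).2
    let filtered := (PySem.List.enumerate content).foldl
        (fun acc p => if pvASkip ranges p.1 then acc else acc ++ [p.2]) ([] : List String)
    -- third pass (the Python also tracks has_overview here, which it never uses)
    let normalized := filtered.foldl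
        (fun acc line =>
          let st := PySem.Str.rstrip line
          if st = "---" then acc else acc ++ [st]) ([] : List String)
    let normalized := pvPopTrailing normalized
    let final := (normalized.foldl pvAFinalStep ([], false)).1
    PySem.Str.strip (PySem.Str.join "\n" final)

-- ===== PORT B =====

-- B: the combined end-marker test of the forward end_idx scan
def pvEndCond (start_idx : Int) (p : Int × String) : Bool :=
  let s := PySem.Str.strip p.2
  PySem.Str.startswith s "**Note:" || PySem.Str.startswith s "Note:"
    || (s == "---" && decide (start_idx + 5 < p.1))

-- B: last[s] = i for every header line
def pvBLastStep (d : PySem.Dict String Int) (p : Int × String) : PySem.Dict String Int :=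
  let s := PySem.Str.strip p.2
  if PySem.Str.startswith s "###" then d.insert s p.1 else d

-- B: the open-headers set update of one sweep step
def pvBOpens (last : PySem.Dict String Int) (opens : PySem.Set String)
    (p : Int × String) : PySem.Set String :=
  let s := PySem.Str.strip p.2
  if PySem.Str.startswith s "###" then
    (if last.getD s (-1) > p.1 then PySem.Set.add opens s else PySem.Set.discard opens s)
  else opens

-- B: the single sweep — maintain the open-headers set, keep cleaned lines while it is empty
def pvBSweepStep (last : PySem.Dict String Int) (st : PySem.Set String × List String)
    (p : Int × String) : PySem.Set String × List String :=
  let opens := pvBOpens last st.1 p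
  (opens,
    if opens.isEmpty then
      let r := PySem.Str.rstrip p.2
      if r = "---" then st.2 else st.2 ++ [r]
    else st.2)

-- B: backward pass — keep a line unless it is blank and not followed by a kept non-blank
def pvBCollapseStep (out : List String) (l : String) : List String :=
  if (PySem.Str.strip l != "")
      || (!out.isEmpty && (PySem.Str.strip (out.getLastD "") != "")) then
    out ++ [l]
  else out

def normalize_llm_summary_py_alt (summary : String) : String :=
  if summary = "" ∨ PySem.Str.strip summary = "" then summary
  else
    let lines := (PySem.Str.split? summary "\n").getD []   -- sep "\n" ≠ "": split? is never none
    let start_idx := (((PySem.List.enumerate lines).find?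
        (fun p => PySem.Str.startswith (PySem.Str.strip p.2) "###")).map (·.1)).getD 0
    let end_idx := (PySem.List.enumerate lines).foldl
        (fun (e : Int) (p : Int × String) => if pvEndCond start_idx p then p.1 else e)
        (lines.length : Int)
    let content := PySem.List.slice lines (some start_idx) (some end_idx)
    let last := (PySem.List.enumerate content).foldl pvBLastStep PySem.Dict.empty
    let kept := ((PySem.List.enumerate content).foldl (pvBSweepStep last)
        ((PySem.Set.empty : PySem.Set String), ([] : List String))).2
    let out := (kept.reverse.foldl pvBCollapseStep ([] : List String)).reverse
    PySem.Str.strip (PySem.Str.join "\n" out)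

-- ===== PRECONDITION & SPEC =====
def Spec_normalize_llm_summary_py (summary : String) (out : String) : Prop := out = normalize_llm_summary_py_alt summary
instance (summary : String) (out : String) : Decidable (Spec_normalize_llm_summary_py summary out) := by unfold Spec_normalize_llm_summary_py; infer_instance

-- ===== CLAIM (what is proved, stated in full; the proofs are below) =====
def Claim_equal_normalize_llm_summary_py : Prop := ∀ (summary : String), Dom_normalize_llm_summary_py summary → Spec_normalize_llm_summary_py summary (normalize_llm_summary_py summary)

-- ===== LEMMAS AND PROOFS =====

-- start index: A's break-loop is first-match-or-0
theorem pvStart_eq (l : List (Int × String)) :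
    pvAStart l =
      (((l.find? (fun p => PySem.Str.startswith (PySem.Str.strip p.2) "###")).map (·.1)).getD 0) := by
  induction l with
  | nil => rfl
  | cons x t ih =>
      obtain ⟨i, line⟩ := x
      by_cases h : PySem.Str.startswith (PySem.Str.strip line) "###" = true <;>
        simp only [pvAStart, List.find?, h, ih, Option.map, Option.getD] <;> simp

-- end index: A's if/elif chain on one element is the combined condition pvEndCond
theorem pvAEnd_cons (s0 d i : Int) (line : String) (rest : List (Int × String)) :
    pvAEnd s0 d ((i, line) :: rest) =
      if pvEndCond s0 (i, line) then i else pvAEnd s0 d rest := by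
  simp only [pvAEnd, pvEndCond]
  split_ifs with h1 h2 h3 h4 <;> try rfl
  · exfalso
    simp only [Bool.or_eq_true] at h1 h2
    exact h2 (Or.inl h1)
  · exfalso
    simp only [Bool.or_eq_true, Bool.and_eq_true, beq_iff_eq, decide_eq_true_eq] at h4
    exact h4 (Or.inr ⟨h3.1, h3.2⟩)
  · exfalso
    rename_i h5
    simp only [Bool.or_eq_true, Bool.and_eq_true, beq_iff_eq, decide_eq_true_eq] at h5 h1
    rcases h5 with h | h
    · exact h1 h
    · exact h3 h

theorem pvAEnd_append (s0 d : Int) (l : List (Int × String)) (x : Int × String) :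
    pvAEnd s0 d (l ++ [x]) = pvAEnd s0 (if pvEndCond s0 x then x.1 else d) l := by
  induction l with
  | nil => obtain ⟨i, line⟩ := x; simp [pvAEnd_cons, pvAEnd]
  | cons y t ih => obtain ⟨i, line⟩ := y; simp only [List.cons_append, pvAEnd_cons, ih]

-- A's backwards scan with break is B's forward fold keeping the last hit
theorem pvEnd_eq (s0 : Int) (l : List (Int × String)) (d : Int) :
    pvAEnd s0 d l.reverse =
      l.foldl (fun e p => if pvEndCond s0 p then p.1 else e) d := by
  induction l generalizing d with
  | nil => rfl
  | cons x t ih => rw [List.reverse_cons, pvAEnd_append, List.foldl_cons, ih]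

-- ---------- the dedup regions: A's ranges and B's open-set sweep both mean "straddled" ----------

-- "p is a ### header line"
def pvHdr (p : Int × String) : Bool := PySem.Str.startswith (PySem.Str.strip p.2) "###"

-- "some header string occurs in L"
def pvOccIn (L : List (Int × String)) (s : String) : Prop :=
  ∃ p ∈ L, pvHdr p = true ∧ PySem.Str.strip p.2 = s

-- "some header string occurs both at an index ≤ j and at an index > j"
def pvStrP (E : List (Int × String)) (j : Int) : Prop :=
  ∃ pl ∈ E, (pvHdr pl = true ∧ pl.1 ≤ j) ∧
    ∃ pu ∈ E, (pvHdr pu = true ∧ PySem.Str.strip pu.2 = PySem.Str.strip pl.2) ∧ j < pu.1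

def pvStrB (E : List (Int × String)) (j : Int) : Bool :=
  E.any (fun pl => pvHdr pl && decide (pl.1 ≤ j) &&
    E.any (fun pu => pvHdr pu && (PySem.Str.strip pu.2 == PySem.Str.strip pl.2) && decide (j < pu.1)))

theorem pvStrB_iff (E : List (Int × String)) (j : Int) : pvStrB E j = true ↔ pvStrP E j := by
  simp [pvStrB, pvStrP, List.any_eq_true, and_assoc]

theorem pvOccIn_append_singleton (Q : List (Int × String)) (p : Int × String) (t : String) :
    pvOccIn (Q ++ [p]) t ↔ pvOccIn Q t ∨ (pvHdr p = true ∧ PySem.Str.strip p.2 = t) := by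
  simp [pvOccIn, or_comm]

theorem pvOccIn_cons (p : Int × String) (R : List (Int × String)) (t : String) :
    pvOccIn (p :: R) t ↔ (pvHdr p = true ∧ PySem.Str.strip p.2 = t) ∨ pvOccIn R t := by
  simp [pvOccIn]

-- the headers_seen dict of A IS the last-occurrence dict of B
theorem pvFst_stepA (st : PySem.Dict String Int × List (Int × Int)) (p : Int × String) :
    (pvAStepDedup st p).1 = pvBLastStep st.1 p := by
  simp only [pvAStepDedup, pvBLastStep]
  split
  · split <;> rfl
  · rfl

theorem pvFst_foldA (E : List (Int × String)) (d : PySem.Dict String Int)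
    (r : List (Int × Int)) :
    (E.foldl pvAStepDedup (d, r)).1 = E.foldl pvBLastStep d := by
  induction E generalizing d r with
  | nil => rfl
  | cons p t ih =>
      simp only [List.foldl_cons]
      have h := pvFst_stepA (d, r) p
      calc (t.foldl pvAStepDedup (pvAStepDedup (d, r) p)).1
          = t.foldl pvBLastStep (pvAStepDedup (d, r) p).1 := by
            obtain ⟨d', r'⟩ := pvAStepDedup (d, r) p
            exact ih d' r'
        _ = t.foldl pvBLastStep (pvBLastStep d p) := by rw [h]

-- the last-occurrence dict: some m means m is an occurrence and the maximal one
theorem pvLast_some (E : List (Int × String))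
    (hinc : E.Pairwise (fun a b => a.1 < b.1)) (s : String) (m : Int)
    (h : (E.foldl pvBLastStep PySem.Dict.empty).get? s = some m) :
    (∃ q ∈ E, q.1 = m ∧ pvHdr q = true ∧ PySem.Str.strip q.2 = s) ∧
      (∀ q ∈ E, pvHdr q = true → PySem.Str.strip q.2 = s → q.1 ≤ m) := by
  induction E using List.reverseRecOn generalizing m with
  | nil => rw [List.foldl_nil, PySem.Dict.get?_empty] at h; cases h
  | append_singleton Q p ih =>
      have hQ : ∀ q ∈ Q, q.1 < p.1 := by
        intro q hq
        have := (List.pairwise_append.1 hinc).2.2 q hq p (List.mem_singleton_self p)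
        exact this
      have hQinc : Q.Pairwise (fun a b => a.1 < b.1) := (List.pairwise_append.1 hinc).1
      rw [List.foldl_append, List.foldl_cons, List.foldl_nil] at h
      by_cases hh : pvHdr p = true
      · rw [pvBLastStep, if_pos (show PySem.Str.startswith (PySem.Str.strip p.2) "###" = true from hh)] at h
        by_cases hse : s = PySem.Str.strip p.2
        · subst hse
          rw [PySem.Dict.get?_insert, if_pos rfl] at h
          obtain rfl := Option.some.inj h
          refine ⟨⟨p, by simp, rfl, hh, rfl⟩, ?_⟩
          intro q hq _ _
          rcases List.mem_append.1 hq with hq | hq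
          · exact le_of_lt (hQ q hq)
          · rcases List.mem_singleton.1 hq with rfl; exact le_refl _
        · rw [PySem.Dict.get?_insert, if_neg hse] at h
          obtain ⟨⟨q, hq, h1, h2, h3⟩, hmax⟩ := ih hQinc m h
          refine ⟨⟨q, List.mem_append_left _ hq, h1, h2, h3⟩, ?_⟩
          intro q' hq' hh' hs'
          rcases List.mem_append.1 hq' with hq' | hq'
          · exact hmax q' hq' hh' hs'
          · rcases List.mem_singleton.1 hq' with rfl
            exact absurd hs'.symm hse
      · rw [pvBLastStep, if_neg (show ¬ PySem.Str.startswith (PySem.Str.strip p.2) "###" = true from hh)] at h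
        obtain ⟨⟨q, hq, h1, h2, h3⟩, hmax⟩ := ih hQinc m h
        refine ⟨⟨q, List.mem_append_left _ hq, h1, h2, h3⟩, ?_⟩
        intro q' hq' hh' hs'
        rcases List.mem_append.1 hq' with hq' | hq'
        · exact hmax q' hq' hh' hs'
        · rcases List.mem_singleton.1 hq' with rfl; exact absurd hh' hh

-- every header line has an entry in the last-occurrence dict
theorem pvLast_mem (E : List (Int × String)) (p : Int × String) (hp : p ∈ E)
    (hh : pvHdr p = true) :
    ∃ m, (E.foldl pvBLastStep PySem.Dict.empty).get? (PySem.Str.strip p.2) = some m := by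
  induction E using List.reverseRecOn with
  | nil => cases hp
  | append_singleton Q x ih =>
      rw [List.foldl_append, List.foldl_cons, List.foldl_nil]
      by_cases hhx : pvHdr x = true
      · rw [pvBLastStep, if_pos (show PySem.Str.startswith (PySem.Str.strip x.2) "###" = true from hhx)]
        by_cases hse : PySem.Str.strip p.2 = PySem.Str.strip x.2
        · rw [PySem.Dict.get?_insert, if_pos hse]; exact ⟨x.1, rfl⟩
        · rw [PySem.Dict.get?_insert, if_neg hse]
          rcases List.mem_append.1 hp with hp | hp
          · exact ih hp
          · rcases List.mem_singleton.1 hp with rfl; exact absurd rfl hse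
      · rw [pvBLastStep, if_neg (show ¬ PySem.Str.startswith (PySem.Str.strip x.2) "###" = true from hhx)]
        rcases List.mem_append.1 hp with hp | hp
        · exact ih hp
        · rcases List.mem_singleton.1 hp with rfl; exact absurd hh hhx

-- B's test 'last[s] > i' says exactly 'a later occurrence of this header exists'
theorem pvLast_gt_iff (E : List (Int × String))
    (hinc : E.Pairwise (fun a b => a.1 < b.1)) (p : Int × String) (hp : p ∈ E)
    (hh : pvHdr p = true) :
    ((E.foldl pvBLastStep PySem.Dict.empty).getD (PySem.Str.strip p.2) (-1) > p.1) ↔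
      ∃ q ∈ E, pvHdr q = true ∧ PySem.Str.strip q.2 = PySem.Str.strip p.2 ∧ p.1 < q.1 := by
  obtain ⟨m, hm⟩ := pvLast_mem E p hp hh
  obtain ⟨⟨q, hq, hq1, hq2, hq3⟩, hmax⟩ := pvLast_some E hinc _ m hm
  rw [PySem.Dict.getD_eq_get?_getD, hm, Option.getD_some]
  constructor
  · intro hgt
    exact ⟨q, hq, hq2, hq3, by omega⟩
  · rintro ⟨q', hq', hh', hs', hlt⟩
    have := hmax q' hq' hh' hs'
    omega

-- A's dedup step, second component, in closed form
theorem pvAStepDedup_snd_hdr (st : PySem.Dict String Int × List (Int × Int)) (p : Int × String)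
    (hh : PySem.Str.startswith (PySem.Str.strip p.2) "###" = true) :
    (pvAStepDedup st p).2 =
      (match st.1.get? (PySem.Str.strip p.2) with
       | some prev => st.2 ++ [(prev, p.1)]
       | none => st.2) := by
  simp only [pvAStepDedup, hh, if_true]
  cases st.1.get? (PySem.Str.strip p.2) <;> rfl

theorem pvAStepDedup_snd_nothdr (st : PySem.Dict String Int × List (Int × Int)) (p : Int × String)
    (hh : PySem.Str.startswith (PySem.Str.strip p.2) "###" = false) :
    (pvAStepDedup st p).2 = st.2 := by
  simp only [pvAStepDedup, hh, Bool.false_eq_true, if_false]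

-- A's ranges test = the straddle predicate
theorem pvASkip_eq_strB (E : List (Int × String))
    (hinc : E.Pairwise (fun a b => a.1 < b.1)) (j : Int) :
    pvASkip (E.foldl pvAStepDedup (PySem.Dict.empty, [])).2 j = pvStrB E j := by
  induction E using List.reverseRecOn with
  | nil => rfl
  | append_singleton Q p ih =>
      have hQ : ∀ q ∈ Q, q.1 < p.1 := fun q hq =>
        (List.pairwise_append.1 hinc).2.2 q hq p (List.mem_singleton_self p)
      have hQinc : Q.Pairwise (fun a b => a.1 < b.1) := (List.pairwise_append.1 hinc).1
      rw [List.foldl_append, List.foldl_cons, List.foldl_nil]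
      rw [Bool.eq_iff_iff, pvStrB_iff]
      have ihiff : pvASkip (Q.foldl pvAStepDedup (PySem.Dict.empty, [])).2 j = true ↔ pvStrP Q j := by
        rw [ih hQinc, pvStrB_iff]
      have hfst : (Q.foldl pvAStepDedup (PySem.Dict.empty, [])).1
          = Q.foldl pvBLastStep PySem.Dict.empty := pvFst_foldA Q _ _
      by_cases hh : pvHdr p = true
      · rw [pvAStepDedup_snd_hdr _ _ hh]
        cases hget : (Q.foldl pvAStepDedup (PySem.Dict.empty, [])).1.get? (PySem.Str.strip p.2) with
        | none =>
            rw [ihiff]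
            have hno : ∀ q ∈ Q, pvHdr q = true → PySem.Str.strip q.2 ≠ PySem.Str.strip p.2 := by
              intro q hq hhq he
              obtain ⟨m, hm⟩ := pvLast_mem Q q hq hhq
              rw [he, ← hfst, hget] at hm
              cases hm
            constructor
            · rintro ⟨pl, hpl, h1, pu, hpu, h2, h3⟩
              exact ⟨pl, List.mem_append_left _ hpl, h1, pu, List.mem_append_left _ hpu, h2, h3⟩
            · rintro ⟨pl, hpl, ⟨hhl, hjl⟩, pu, hpu, ⟨hhu, hsu⟩, hju⟩
              rcases List.mem_append.1 hpu with hpu' | hpu'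
              · rcases List.mem_append.1 hpl with hpl' | hpl'
                · exact ⟨pl, hpl', ⟨hhl, hjl⟩, pu, hpu', ⟨hhu, hsu⟩, hju⟩
                · have hplp : pl = p := List.mem_singleton.1 hpl'
                  exfalso
                  have := hQ pu hpu'
                  rw [hplp] at hjl
                  omega
              · have hpup : pu = p := List.mem_singleton.1 hpu'
                rcases List.mem_append.1 hpl with hpl' | hpl'
                · have hx : PySem.Str.strip pl.2 = PySem.Str.strip p.2 := by rw [← hsu, hpup]
                  exact absurd hx (hno pl hpl' hhl)
                · have hplp : pl = p := List.mem_singleton.1 hpl'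
                  exfalso
                  rw [hplp] at hjl
                  rw [hpup] at hju
                  omega
        | some m =>
            have hocc := pvLast_some Q hQinc _ m (hfst ▸ hget)
            obtain ⟨⟨qm, hqm, hqm1, hqm2, hqm3⟩, hmax⟩ := hocc
            rw [show pvASkip ((Q.foldl pvAStepDedup (PySem.Dict.empty, [])).2 ++ [(m, p.1)]) j
                = (pvASkip (Q.foldl pvAStepDedup (PySem.Dict.empty, [])).2 j
                    || (decide (m ≤ j) && decide (j < p.1))) from by
              simp [pvASkip, List.any_append]]
            rw [Bool.or_eq_true, Bool.and_eq_true, decide_eq_true_eq, decide_eq_true_eq, ihiff]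
            constructor
            · rintro (hstr | ⟨h1, h2⟩)
              · obtain ⟨pl, hpl, h1, pu, hpu, h2, h3⟩ := hstr
                exact ⟨pl, List.mem_append_left _ hpl, h1, pu, List.mem_append_left _ hpu, h2, h3⟩
              · refine ⟨qm, List.mem_append_left _ hqm, ⟨hqm2, by omega⟩,
                  p, List.mem_append_right _ (List.mem_singleton_self p), ⟨hh, by rw [hqm3]⟩, h2⟩
            · rintro ⟨pl, hpl, ⟨hhl, hjl⟩, pu, hpu, ⟨hhu, hsu⟩, hju⟩
              rcases List.mem_append.1 hpu with hpu' | hpu'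
              · rcases List.mem_append.1 hpl with hpl' | hpl'
                · exact Or.inl ⟨pl, hpl', ⟨hhl, hjl⟩, pu, hpu', ⟨hhu, hsu⟩, hju⟩
                · have hplp : pl = p := List.mem_singleton.1 hpl'
                  exfalso
                  have := hQ pu hpu'
                  rw [hplp] at hjl
                  omega
              · have hpup : pu = p := List.mem_singleton.1 hpu'
                rcases List.mem_append.1 hpl with hpl' | hpl'
                · have hsl : PySem.Str.strip pl.2 = PySem.Str.strip p.2 := by rw [← hsu, hpup]
                  have hplm := hmax pl hpl' hhl hsl
                  by_cases hmj : m ≤ j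
                  · refine Or.inr ⟨hmj, ?_⟩
                    rw [← hpup]
                    exact hju
                  · refine Or.inl ⟨pl, hpl', ⟨hhl, hjl⟩, qm, hqm, ⟨hqm2, hqm3.trans hsl.symm⟩, ?_⟩
                    omega
                · have hplp : pl = p := List.mem_singleton.1 hpl'
                  exfalso
                  rw [hplp] at hjl
                  rw [hpup] at hju
                  omega
      · rw [Bool.not_eq_true] at hh
        rw [pvAStepDedup_snd_nothdr _ _ hh, ihiff]
        constructor
        · rintro ⟨pl, hpl, h1, pu, hpu, h2, h3⟩
          exact ⟨pl, List.mem_append_left _ hpl, h1, pu, List.mem_append_left _ hpu, h2, h3⟩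
        · rintro ⟨pl, hpl, ⟨hhl, hjl⟩, pu, hpu, ⟨hhu, hsu⟩, hju⟩
          rcases List.mem_append.1 hpl with hpl' | hpl'
          · rcases List.mem_append.1 hpu with hpu' | hpu'
            · exact ⟨pl, hpl', ⟨hhl, hjl⟩, pu, hpu', ⟨hhu, hsu⟩, hju⟩
            · have hpup : pu = p := List.mem_singleton.1 hpu'
              exact absurd (hpup ▸ hhu) (by simp [hh])
          · have hplp : pl = p := List.mem_singleton.1 hpl'
            exact absurd (hplp ▸ hhl) (by simp [hh])

-- B's sweep, with the open-headers invariant, produces the straddle-filtered clean list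
theorem pvSweep_inv (Efull : List (Int × String))
    (hinc : Efull.Pairwise (fun a b => a.1 < b.1)) :
    ∀ (R Q : List (Int × String)) (opens : PySem.Set String) (acc : List String),
      Efull = Q ++ R →
      (∀ t, t ∈ opens ↔ pvOccIn Q t ∧ pvOccIn R t) →
      (R.foldl (pvBSweepStep (Efull.foldl pvBLastStep PySem.Dict.empty)) (opens, acc)).2
        = acc ++ (((R.filter (fun p => !pvStrB Efull p.1)).map
            (fun p => PySem.Str.rstrip p.2)).filter (fun r => !(r == "---"))) := by
  intro R
  induction R with
  | nil => intro Q opens acc _ _; simp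
  | cons p R' ih =>
      intro Q opens acc hE hop
      have hpair : (Q ++ p :: R').Pairwise (fun a b => a.1 < b.1) := hE ▸ hinc
      have hQ : ∀ q ∈ Q, q.1 < p.1 := fun q hq =>
        (List.pairwise_append.1 hpair).2.2 q hq p List.mem_cons_self
      have hR : ∀ q ∈ R', p.1 < q.1 :=
        (List.pairwise_cons.1 (List.pairwise_append.1 hpair).2.1).1
      have hpE : p ∈ Efull := hE ▸ List.mem_append_right _ List.mem_cons_self
      rw [List.foldl_cons]
      have hsw : pvBSweepStep (Efull.foldl pvBLastStep PySem.Dict.empty) (opens, acc) p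
          = (pvBOpens (Efull.foldl pvBLastStep PySem.Dict.empty) opens p,
             if (pvBOpens (Efull.foldl pvBLastStep PySem.Dict.empty) opens p).isEmpty then
               (if PySem.Str.rstrip p.2 = "---" then acc else acc ++ [PySem.Str.rstrip p.2])
             else acc) := rfl
      set opens' := pvBOpens (Efull.foldl pvBLastStep PySem.Dict.empty) opens p with hopens
      have hop' : ∀ t, t ∈ opens' ↔ pvOccIn (Q ++ [p]) t ∧ pvOccIn R' t := by
        intro t
        rw [hopens]
        simp only [pvBOpens]
        by_cases hh : PySem.Str.startswith (PySem.Str.strip p.2) "###" = true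
        · rw [if_pos hh]
          have hcond : ((Efull.foldl pvBLastStep PySem.Dict.empty).getD
              (PySem.Str.strip p.2) (-1) > p.1) ↔ pvOccIn R' (PySem.Str.strip p.2) := by
            rw [pvLast_gt_iff Efull hinc p hpE hh]
            constructor
            · rintro ⟨q, hq, hh', hs', hlt⟩
              rw [hE] at hq
              rcases List.mem_append.1 hq with hq | hq
              · have := hQ q hq; omega
              · rcases List.mem_cons.1 hq with rfl | hq
                · omega
                · exact ⟨q, hq, hh', hs'⟩
            · rintro ⟨q, hq, hh', hs'⟩
              exact ⟨q, hE ▸ List.mem_append_right _ (List.mem_cons_of_mem _ hq),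
                hh', hs', hR q hq⟩
          by_cases hc : (Efull.foldl pvBLastStep PySem.Dict.empty).getD
              (PySem.Str.strip p.2) (-1) > p.1
          · rw [if_pos hc, PySem.Set.mem_add]
            by_cases ht : t = PySem.Str.strip p.2
            · subst ht
              simp only [or_true, true_iff]
              exact ⟨(pvOccIn_append_singleton Q p _).2 (Or.inr ⟨hh, rfl⟩), hcond.1 hc⟩
            · rw [pvOccIn_append_singleton, hop t, pvOccIn_cons]
              constructor
              · rintro (⟨h1, h2⟩ | h)
                · rcases h2 with ⟨hph, hps⟩ | h2
                  · exact absurd hps.symm ht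
                  · exact ⟨Or.inl h1, h2⟩
                · exact absurd h ht
              · rintro ⟨h1 | ⟨hph, hps⟩, h2⟩
                · exact Or.inl ⟨h1, Or.inr h2⟩
                · exact absurd hps.symm ht
          · rw [if_neg hc, PySem.Set.mem_discard]
            by_cases ht : t = PySem.Str.strip p.2
            · subst ht
              simp only [ne_eq, not_true_eq_false, and_false, false_iff, not_and]
              intro _
              exact fun hocc => hc (hcond.2 hocc)
            · rw [hop t, pvOccIn_append_singleton, pvOccIn_cons]
              constructor
              · rintro ⟨⟨h1, h2⟩, _⟩
                rcases h2 with ⟨hph, hps⟩ | h2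
                · exact absurd hps.symm ht
                · exact ⟨Or.inl h1, h2⟩
              · rintro ⟨h1 | ⟨hph, hps⟩, h2⟩
                · exact ⟨⟨h1, Or.inr h2⟩, ht⟩
                · exact absurd hps.symm ht
        · rw [if_neg hh]
          rw [hop t, pvOccIn_append_singleton, pvOccIn_cons]
          constructor
          · rintro ⟨h1, h2⟩
            rcases h2 with ⟨hph, _⟩ | h2
            · exact absurd (show PySem.Str.startswith (PySem.Str.strip p.2) "###" = true from hph) hh
            · exact ⟨Or.inl h1, h2⟩
          · rintro ⟨h1 | ⟨hph, _⟩, h2⟩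
            · exact ⟨h1, Or.inr h2⟩
            · exact absurd (show PySem.Str.startswith (PySem.Str.strip p.2) "###" = true from hph) hh
      have hempty : opens'.isEmpty = !pvStrB Efull p.1 := by
        rw [Bool.eq_iff_iff, List.isEmpty_iff, Bool.not_eq_true', ← Bool.not_eq_true,
          pvStrB_iff]
        constructor
        · intro hnil hstr
          obtain ⟨pl, hpl, ⟨hhl, hjl⟩, pu, hpu, ⟨hhu, hsu⟩, hju⟩ := hstr
          have hplQ : pl ∈ Q ++ [p] := by
            rw [hE] at hpl
            rcases List.mem_append.1 hpl with h | h
            · exact List.mem_append_left _ h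
            · rcases List.mem_cons.1 h with rfl | h
              · exact List.mem_append_right _ (List.mem_singleton_self _)
              · have := hR pl h; omega
          have hpuR : pu ∈ R' := by
            rw [hE] at hpu
            rcases List.mem_append.1 hpu with h | h
            · have := hQ pu h; omega
            · rcases List.mem_cons.1 h with rfl | h
              · omega
              · exact h
          have hmem : PySem.Str.strip pl.2 ∈ opens' := by
            rw [hop']
            exact ⟨⟨pl, hplQ, hhl, rfl⟩, ⟨pu, hpuR, hhu, hsu⟩⟩
          rw [hnil] at hmem
          cases hmem
        · intro hno
          rw [List.eq_nil_iff_forall_not_mem]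
          intro t ht
          rw [hop' t] at ht
          obtain ⟨⟨pl, hpl, hhl, hsl⟩, ⟨pu, hpu, hhu, hsu⟩⟩ := ht
          refine hno ⟨pl, hE ▸ ?_, ⟨hhl, ?_⟩, pu,
            hE ▸ List.mem_append_right _ (List.mem_cons_of_mem _ hpu), ⟨hhu, by rw [hsu, hsl]⟩,
            hR pu hpu⟩
          · rcases List.mem_append.1 hpl with h | h
            · exact List.mem_append_left _ h
            · rcases List.mem_singleton.1 h with rfl
              exact List.mem_append_right _ List.mem_cons_self
          · rcases List.mem_append.1 hpl with h | h
            · exact le_of_lt (hQ pl h)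
            · rcases List.mem_singleton.1 h with rfl; exact le_refl _
      have hE' : Efull = (Q ++ [p]) ++ R' := by rw [hE]; simp
      rw [hsw]
      by_cases hs : pvStrB Efull p.1 = true
      · have he : opens'.isEmpty = false := by simp [hempty, hs]
        rw [he]
        simp only [Bool.false_eq_true, if_false]
        rw [ih (Q ++ [p]) opens' acc hE' hop']
        rw [List.filter_cons_of_neg (by simp [hs])]
      · rw [Bool.not_eq_true] at hs
        have he : opens'.isEmpty = true := by simp [hempty, hs]
        rw [he]
        simp only [if_true]
        rw [List.filter_cons_of_pos (by simp [hs]), List.map_cons]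
        by_cases hdash : PySem.Str.rstrip p.2 = "---"
        · rw [if_pos hdash, List.filter_cons_of_neg (by simp [hdash]),
            ih (Q ++ [p]) opens' acc hE' hop']
        · rw [if_neg hdash, List.filter_cons_of_pos (by simp [hdash]),
            ih (Q ++ [p]) opens' (acc ++ [PySem.Str.rstrip p.2]) hE' hop']
          simp

-- A's skip-filtering fold in filter form
theorem pvFoldSkip (ranges : List (Int × Int)) (l : List (Int × String)) :
    l.foldl (fun acc p => if pvASkip ranges p.1 then acc else acc ++ [p.2]) ([] : List String) =
      (l.filter (fun p => !pvASkip ranges p.1)).map (·.2) := by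
  have hcg : ∀ (acc : List String), ∀ p ∈ l,
      (if pvASkip ranges p.1 then acc else acc ++ [p.2]) =
      (if (!pvASkip ranges p.1) = true then acc ++ [p.2] else acc) := by
    intro acc p _
    cases pvASkip ranges p.1 <;> simp
  rw [PySem.List.foldl_congr_mem l _ _ _ hcg, PySem.List.foldl_append_if]
  simp

-- A's rstrip-and-drop-separators fold in filter form
theorem pvFoldClean (l : List String) :
    l.foldl (fun acc line =>
        if PySem.Str.rstrip line = "---" then acc else acc ++ [PySem.Str.rstrip line]) ([] : List String) =
      (l.filter (fun line => !(PySem.Str.rstrip line == "---"))).map PySem.Str.rstrip := by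
  have hcg : ∀ (acc : List String), ∀ line ∈ l,
      (if PySem.Str.rstrip line = "---" then acc else acc ++ [PySem.Str.rstrip line]) =
      (if (!(PySem.Str.rstrip line == "---")) = true then acc ++ [PySem.Str.rstrip line] else acc) := by
    intro acc line _
    by_cases h : PySem.Str.rstrip line = "---" <;> simp [h]
  rw [PySem.List.foldl_congr_mem l _ _ _ hcg, PySem.List.foldl_append_if]
  simp

-- program-specific: rstrip-then-drop on snd commutes with mapping rstrip first
theorem pvCleanComm (l : List (Int × String)) :
    ((l.map (fun p : Int × String => p.2)).filter
        (fun line => !(PySem.Str.rstrip line == "---"))).map PySem.Str.rstrip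
      = (l.map (fun p : Int × String => PySem.Str.rstrip p.2)).filter
        (fun line => !(line == "---")) := by
  induction l with
  | nil => rfl
  | cons x t ih =>
      simp only [List.map_cons, List.filter_cons]
      by_cases h : (PySem.Str.rstrip x.2 == "---") = true
      · simp [h, ih]
      · rw [Bool.not_eq_true] at h
        simp [h, ih]

-- ---------- the tail cleaning: pop-then-collapse (A) = one backward pass (B) ----------

-- ghost: A's pop loop as a foldr
def pvH (x : String) (r : List String) : List String :=
  if r.isEmpty && (x == "") then [] else x :: r

-- ghost: B's backward pass as a foldr
def pvG (x : String) (r : List String) : List String :=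
  if (PySem.Str.strip x == "") &&
      (match r.head? with
       | some y => PySem.Str.strip y == ""
       | none => true) then r
  else x :: r

-- ghost: A's prev_blank pass as a front recursion
def pvFwd : Bool → List String → List String
  | _, [] => []
  | pb, x :: t =>
      if (PySem.Str.strip x == "") && pb then pvFwd pb t
      else x :: pvFwd (PySem.Str.strip x == "") t

theorem pvFinal_eq_fwd (l : List String) (acc : List String) (pb : Bool) :
    (l.foldl pvAFinalStep (acc, pb)).1 = acc ++ pvFwd pb l := by
  induction l generalizing acc pb with
  | nil => simp [pvFwd]
  | cons x t ih =>
      rw [List.foldl_cons]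
      by_cases hb : ((PySem.Str.strip x == "") && pb) = true
      · have hstep : pvAFinalStep (acc, pb) x = (acc, pb) := by
          simp only [pvAFinalStep]; rw [if_pos hb]
        rw [hstep, ih, pvFwd, if_pos hb]
      · have hstep : pvAFinalStep (acc, pb) x = (acc ++ [x], (PySem.Str.strip x == "")) := by
          simp only [pvAFinalStep]; rw [if_neg hb]
        rw [hstep, ih, pvFwd, if_neg hb, List.append_assoc, List.singleton_append]

theorem pvFoldrH_nonempty (l : List String) (r : List String) (hr : r ≠ []) :
    l.foldr pvH r = l ++ r := by
  induction l with
  | nil => rfl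
  | cons x t ih =>
      rw [List.foldr_cons, ih, pvH]
      have hne : (t ++ r).isEmpty = false := by
        simp [hr]
      rw [hne]
      simp

theorem pvPop_concat (t : List String) (x : String) :
    pvPopTrailing (t ++ [x]) = if x = "" then pvPopTrailing t else t ++ [x] := by
  conv_lhs => unfold pvPopTrailing
  split
  · rename_i last h
    rw [List.getLast?_concat] at h
    obtain rfl := Option.some.inj h
    rw [List.dropLast_concat]
  · rename_i h
    rw [List.getLast?_concat] at h
    cases h

theorem pvPop_eq_foldrH (l : List String) : pvPopTrailing l = l.foldr pvH [] := by
  induction l using List.reverseRecOn with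
  | nil => unfold pvPopTrailing; rfl
  | append_singleton t x ih =>
      rw [List.foldr_append, List.foldr_cons, List.foldr_nil, pvPop_concat]
      by_cases hx : x = ""
      · subst hx
        rw [if_pos rfl, show pvH "" [] = ([] : List String) from by decide, ih]
      · rw [if_neg hx, show pvH x [] = [x] from by simp [pvH, hx],
          pvFoldrH_nonempty t [x] (by simp)]

theorem pvH_eq_nil_iff (x : String) (r : List String) :
    pvH x r = [] ↔ r = [] ∧ x = "" := by
  by_cases hc : (r.isEmpty && (x == "")) = true
  · rw [Bool.and_eq_true, List.isEmpty_iff, beq_iff_eq] at hc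
    simp [pvH, hc.1, hc.2]
  · have h2 : pvH x r = x :: r := by rw [pvH, if_neg hc]
    rw [h2]
    constructor
    · intro h; exact absurd h (List.cons_ne_nil _ _)
    · rintro ⟨rfl, rfl⟩; exact absurd (by simp) hc

theorem pvFoldrH_nil_G (t : List String) (h : t.foldr pvH [] = []) : t.foldr pvG [] = [] := by
  induction t with
  | nil => rfl
  | cons y t' ih =>
      rw [List.foldr_cons] at h ⊢
      rw [pvH_eq_nil_iff] at h
      obtain ⟨h1, rfl⟩ := h
      rw [ih h1]
      decide

theorem pvFoldrH_mem (t : List String) (x : String) (h : x ∈ t.foldr pvH []) : x ∈ t := by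
  induction t with
  | nil => cases h
  | cons y t' ih =>
      rw [List.foldr_cons] at h
      unfold pvH at h
      split at h
      · cases h
      · rcases List.mem_cons.1 h with rfl | h
        · exact List.mem_cons_self
        · exact List.mem_cons_of_mem _ (ih h)

-- small-step equations for pvFwd and pvG
theorem pvFwd_blank_false (x : String) (t : List String) (h : PySem.Str.strip x = "") :
    pvFwd false (x :: t) = x :: pvFwd true t := by
  simp [pvFwd, h]

theorem pvFwd_blank_true (x : String) (t : List String) (h : PySem.Str.strip x = "") :
    pvFwd true (x :: t) = pvFwd true t := by
  simp [pvFwd, h]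

theorem pvFwd_nonblank (pb : Bool) (x : String) (t : List String)
    (h : ¬ PySem.Str.strip x = "") : pvFwd pb (x :: t) = x :: pvFwd false t := by
  have hbe : (PySem.Str.strip x == "") = false := by simp [h]
  simp [pvFwd, hbe]

theorem pvG_blank_nil (x : String) (h : PySem.Str.strip x = "") : pvG x [] = [] := by
  simp [pvG, h]

theorem pvG_blank_cons_blank (x y : String) (r : List String)
    (hx : PySem.Str.strip x = "") (hy : PySem.Str.strip y = "") :
    pvG x (y :: r) = y :: r := by
  simp [pvG, hx, hy]

theorem pvG_blank_cons_nonblank (x y : String) (r : List String)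
    (hx : PySem.Str.strip x = "") (hy : ¬ PySem.Str.strip y = "") :
    pvG x (y :: r) = x :: y :: r := by
  simp [pvG, hx, hy]

theorem pvG_nonblank (x : String) (r : List String) (h : ¬ PySem.Str.strip x = "") :
    pvG x r = x :: r := by
  cases r with
  | nil => simp [pvG, h]
  | cons y r' => simp [pvG, h]

theorem pvFwd_eq_G (l : List String) (hbl : ∀ x ∈ l, PySem.Str.strip x = "" → x = "") :
    pvFwd false (l.foldr pvH []) = l.foldr pvG [] := by
  induction l with
  | nil => rfl
  | cons x t ih =>
      have hbt : ∀ y ∈ t, PySem.Str.strip y = "" → y = "" :=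
        fun y hy => hbl y (List.mem_cons_of_mem _ hy)
      have iht := ih hbt
      rw [List.foldr_cons, List.foldr_cons]
      by_cases hb : PySem.Str.strip x = ""
      · have hx : x = "" := hbl x List.mem_cons_self hb
        subst hx
        cases hP : t.foldr pvH [] with
        | nil =>
            have hG : t.foldr pvG [] = [] := pvFoldrH_nil_G t hP
            rw [hG, pvG_blank_nil _ hb,
              show pvH "" [] = ([] : List String) from by decide]
            rfl
        | cons p P' =>
            rw [hP] at iht
            rw [show pvH "" (p :: P') = "" :: p :: P' from by simp [pvH]]
            rw [pvFwd_blank_false _ _ hb]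
            by_cases hp : PySem.Str.strip p = ""
            · have hpe : p = "" :=
                hbt p (pvFoldrH_mem t p (by rw [hP]; exact List.mem_cons_self)) hp
              rw [pvFwd_blank_true _ _ hp]
              rw [pvFwd_blank_false _ _ hp] at iht
              rw [← iht, pvG_blank_cons_blank _ _ _ hb hp]
              rw [hpe]
            · rw [pvFwd_nonblank _ _ _ hp]
              rw [pvFwd_nonblank _ _ _ hp] at iht
              rw [← iht, pvG_blank_cons_nonblank _ _ _ hb hp]
      · have h1 : pvH x (t.foldr pvH []) = x :: t.foldr pvH [] := by
          have hx : ¬ x = "" := fun e => hb (by rw [e]; decide)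
          simp [pvH, hx]
        rw [h1, pvFwd_nonblank _ _ _ hb, iht, pvG_nonblank _ _ hb]

theorem pvCollapse_step (r : List String) (x : String) :
    pvBCollapseStep r.reverse x = (pvG x r).reverse := by
  cases r with
  | nil =>
      by_cases hb : PySem.Str.strip x = ""
      · rw [show ([] : List String).reverse = [] from rfl]
        rw [pvBCollapseStep, if_neg (by simp [hb]), pvG_blank_nil _ hb]
        rfl
      · rw [show ([] : List String).reverse = [] from rfl]
        rw [pvBCollapseStep, if_pos (by simp [hb]), pvG_nonblank _ _ hb]
        rfl
  | cons y r' =>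
      have h1 : ((y :: r').reverse).getLastD "" = y := by
        rw [List.getLastD_eq_getLast?, List.getLast?_reverse, List.head?_cons]
        rfl
      have h2 : ((y :: r').reverse).isEmpty = false := by
        simp
      rw [pvBCollapseStep, h1, h2]
      by_cases hb : PySem.Str.strip x = ""
      · by_cases hy : PySem.Str.strip y = ""
        · rw [if_neg (by simp [hb, hy]), pvG_blank_cons_blank _ _ _ hb hy]
        · rw [if_pos (by simp [hy]), pvG_blank_cons_nonblank _ _ _ hb hy]
          simp [List.reverse_cons]
      · rw [if_pos (by simp [hb]), pvG_nonblank _ _ hb]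
        simp [List.reverse_cons]

theorem pvCollapse_eq_G (l : List String) :
    l.reverse.foldl pvBCollapseStep ([] : List String) = (l.foldr pvG []).reverse := by
  induction l with
  | nil => rfl
  | cons x t ih =>
      rw [List.reverse_cons, List.foldl_append, ih, List.foldl_cons, List.foldl_nil,
        List.foldr_cons]
      exact pvCollapse_step _ x

-- an rstripped all-whitespace string is empty
theorem pvRstripBlank_chars (cs : List Char)
    (h : PySem.Chars.strip (PySem.Chars.rstrip cs) = []) : PySem.Chars.rstrip cs = [] := by
  unfold PySem.Chars.strip PySem.Chars.lstrip PySem.Chars.rstrip at h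
  unfold PySem.Chars.rstrip
  set u := List.dropWhile PySem.Chars.isspace cs.reverse with hu
  rw [List.reverse_eq_nil_iff, List.dropWhile_eq_nil_iff] at h
  have hall : ∀ c ∈ List.dropWhile PySem.Chars.isspace u.reverse, PySem.Chars.isspace c := by
    intro c hc
    exact h c (by rwa [List.mem_reverse])
  have hnil : List.dropWhile PySem.Chars.isspace u.reverse = [] := by
    cases he : List.dropWhile PySem.Chars.isspace u.reverse with
    | nil => rfl
    | cons z zs =>
        have hz : ¬ PySem.Chars.isspace z = true := by
          have := List.head?_dropWhile_not PySem.Chars.isspace u.reverse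
          rw [he] at this
          simpa using this
        exact absurd (hall z (by rw [he]; exact List.mem_cons_self)) hz
  rw [List.dropWhile_eq_nil_iff] at hnil
  cases he : u with
  | nil => simp
  | cons z zs =>
      have hz : ¬ PySem.Chars.isspace z = true := by
        have := List.head?_dropWhile_not PySem.Chars.isspace cs.reverse
        rw [← hu, he] at this
        simpa using this
      have hzsp : PySem.Chars.isspace z = true := by
        apply hnil
        rw [he]
        simp
      exact absurd hzsp hz

theorem pvRstripBlank (y : String) :
    PySem.Str.strip (PySem.Str.rstrip y) = "" → PySem.Str.rstrip y = "" := by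
  intro h
  have h' : (PySem.Str.strip (PySem.Str.rstrip y)).toList = [] := by rw [h]; rfl
  rw [PySem.Str.toList_strip, PySem.Str.toList_rstrip] at h'
  have h2 : (PySem.Str.rstrip y).toList = [] := by
    rw [PySem.Str.toList_rstrip]
    exact pvRstripBlank_chars y.toList h'
  exact String.toList_eq_nil_iff.mp h2

-- the whole pipeline after the early-return guard
theorem pvPipeline_eq (lines : List String) :
    (let start_idx := pvAStart (PySem.List.enumerate lines)
     let end_idx := pvAEnd start_idx (lines.length : Int) (PySem.List.enumerate lines).reverse
     let content := PySem.List.slice lines (some start_idx) (some end_idx)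
     let ranges := ((PySem.List.enumerate content).foldl pvAStepDedup (PySem.Dict.empty, [])).2
     let filtered := (PySem.List.enumerate content).foldl
         (fun acc p => if pvASkip ranges p.1 then acc else acc ++ [p.2]) ([] : List String)
     let normalized := filtered.foldl
         (fun acc line =>
           let st := PySem.Str.rstrip line
           if st = "---" then acc else acc ++ [st]) ([] : List String)
     let normalized := pvPopTrailing normalized
     let final := (normalized.foldl pvAFinalStep ([], false)).1
     PySem.Str.strip (PySem.Str.join "\n" final)) =
    (let start_idx := (((PySem.List.enumerate lines).find?
         (fun p => PySem.Str.startswith (PySem.Str.strip p.2) "###")).map (·.1)).getD 0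
     let end_idx := (PySem.List.enumerate lines).foldl
         (fun (e : Int) (p : Int × String) => if pvEndCond start_idx p then p.1 else e)
         (lines.length : Int)
     let content := PySem.List.slice lines (some start_idx) (some end_idx)
     let last := (PySem.List.enumerate content).foldl pvBLastStep PySem.Dict.empty
     let kept := ((PySem.List.enumerate content).foldl (pvBSweepStep last)
         ((PySem.Set.empty : PySem.Set String), ([] : List String))).2
     let out := (kept.reverse.foldl pvBCollapseStep ([] : List String)).reverse
     PySem.Str.strip (PySem.Str.join "\n" out)) := by
  dsimp only
  rw [pvStart_eq, pvEnd_eq]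
  generalize (PySem.List.slice lines
      (some ((Option.map (fun x => x.1) (List.find? (fun p => PySem.Str.startswith (PySem.Str.strip p.2) "###") (PySem.List.enumerate lines))).getD 0))
      (some (List.foldl (fun e p => if pvEndCond ((Option.map (fun x => x.1) (List.find? (fun p => PySem.Str.startswith (PySem.Str.strip p.2) "###") (PySem.List.enumerate lines))).getD 0) p = true then p.1 else e) ((lines.length : Int)) (PySem.List.enumerate lines)))) = content
  have hinc := PySem.List.pairwise_lt_enumerate content 0
  -- the cleaned, dedup-filtered list both programs reach
  set ghost := (((PySem.List.enumerate content).filter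
      (fun p => !pvStrB (PySem.List.enumerate content) p.1)).map
      (fun p => PySem.Str.rstrip p.2)).filter (fun r => !(r == "---")) with hghost
  -- A's side reaches ghost
  have hA : (((PySem.List.enumerate content).foldl
      (fun acc p => if pvASkip ((PySem.List.enumerate content).foldl pvAStepDedup
          (PySem.Dict.empty, [])).2 p.1 then acc else acc ++ [p.2]) ([] : List String)).foldl
      (fun acc line =>
        if PySem.Str.rstrip line = "---" then acc else acc ++ [PySem.Str.rstrip line])
      ([] : List String)) = ghost := by
    rw [pvFoldSkip, pvFoldClean, pvCleanComm, hghost]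
    congr 1
    congr 1
    apply List.filter_congr
    intro p _
    rw [pvASkip_eq_strB _ hinc]
  -- B's side reaches ghost
  have hB : ((PySem.List.enumerate content).foldl
      (pvBSweepStep ((PySem.List.enumerate content).foldl pvBLastStep PySem.Dict.empty))
      ((PySem.Set.empty : PySem.Set String), ([] : List String))).2 = ghost := by
    have := pvSweep_inv (PySem.List.enumerate content) hinc
      (PySem.List.enumerate content) [] PySem.Set.empty [] (by simp)
      (by intro t; simp [PySem.Set.empty, pvOccIn])
    rw [this, hghost]
    rfl
  rw [hA, hB]
  -- blanks in ghost are literally ""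
  have hbl : ∀ x ∈ ghost, PySem.Str.strip x = "" → x = "" := by
    intro x hx
    rw [hghost] at hx
    have hx' := List.mem_of_mem_filter hx
    obtain ⟨p, _, rfl⟩ := List.mem_map.1 hx'
    exact pvRstripBlank p.2
  rw [pvFinal_eq_fwd, List.nil_append, pvPop_eq_foldrH, pvFwd_eq_G ghost hbl,
    pvCollapse_eq_G, List.reverse_reverse]

-- ===== VERDICT (by name: the statement is the Claim_ definition above) =====
theorem normalize_llm_summary_py_spec : Claim_equal_normalize_llm_summary_py := by
  intro summary _
  unfold Spec_normalize_llm_summary_py normalize_llm_summary_py normalize_llm_summary_py_alt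
  by_cases h0 : summary = "" ∨ PySem.Str.strip summary = ""
  · rw [if_pos h0, if_pos h0]
  · rw [if_neg h0, if_neg h0]
    exact pvPipeline_eq _
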